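-- pv_equiv track=rewrite | github.com/nikhil2213129/codeforce | A. I_love_%username%.py | count_amazing_performances
-- ===== SOURCE A (Python) =====
-- def count_amazing_performances(scores):
--     if len(scores) < 2:
--         return 0
--
--     amazing_count = 0
--     min_score = scores[0]
--     max_score = scores[0]
--
--     for score in scores[1:]:
--         if score > max_score:
--             amazing_count += 1
--             max_score = score
--         elif score < min_score:
--             amazing_count += 1
--             min_score = score
--
--     return amazing_count
-- ===== SOURCE B (Python) =====
-- def count_amazing_performances(scores):
--     def count_records(xs, better):
--         if not xs:
--             return 0
--         best = xs[0]
--         c = 0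
--         for x in xs[1:]:
--             if better(x, best):
--                 c += 1
--                 best = x
--         return c
--     return (count_records(scores, lambda a, b: a > b)
--             + count_records(scores, lambda a, b: a < b))
-- ===== Notes on version B (the rewrite author's own statement) =====
-- stated objective: alternative
-- what changed: A counts records in one combined scan tracking min and max together with a three-way branch; B decomposes the task into a generic single-extremum record counter applied twice (new maxima, then new minima) and sums the two counts.
import Mathlib
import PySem

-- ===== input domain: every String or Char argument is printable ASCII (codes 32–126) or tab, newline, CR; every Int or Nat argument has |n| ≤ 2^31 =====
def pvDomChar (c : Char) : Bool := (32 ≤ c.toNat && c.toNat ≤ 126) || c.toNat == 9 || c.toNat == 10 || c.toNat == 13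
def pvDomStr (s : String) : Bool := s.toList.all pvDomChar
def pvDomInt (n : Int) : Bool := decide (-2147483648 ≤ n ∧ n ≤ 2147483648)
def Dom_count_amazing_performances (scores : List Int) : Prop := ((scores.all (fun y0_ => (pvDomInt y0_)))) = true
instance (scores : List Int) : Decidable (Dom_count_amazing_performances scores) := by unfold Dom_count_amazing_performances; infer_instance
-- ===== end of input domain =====

-- B replaces A's single combined min/max scan by a generic record counter applied twice and summed (alternative decomposition, same O(n) cost).

-- ===== PORT A =====
-- A: one pass with state (count, min, max), three-way branch.
def count_amazing_performances (scores : List Int) : Int :=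
  if scores.length < 2 then 0
  else
    match scores with
    | [] => 0
    | x :: rest =>
      (rest.foldl (fun (st : Int × Int × Int) s =>
        if s > st.2.2 then (st.1 + 1, st.2.1, s)
        else if s < st.2.1 then (st.1 + 1, s, st.2.2)
        else st) (0, x, x)).1

-- ===== PORT B =====
-- B helper: count elements of xs[1:] that improve on the running best under `better`.
def pvCountRecords (better : Int → Int → Bool) (xs : List Int) : Int :=
  match xs with
  | [] => 0
  | x :: rest =>
    (rest.foldl (fun (st : Int × Int) s =>
      if better s st.2 then (st.1 + 1, s) else st) (0, x)).1

def count_amazing_performances_alt (scores : List Int) : Int :=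
  pvCountRecords (fun a b => a > b) scores + pvCountRecords (fun a b => a < b) scores

-- ===== PRECONDITION & SPEC =====
def Spec_count_amazing_performances (scores : List Int) (out : Int) : Prop := out = count_amazing_performances_alt scores
instance (scores : List Int) (out : Int) : Decidable (Spec_count_amazing_performances scores out) := by unfold Spec_count_amazing_performances; infer_instance

-- ===== CLAIM (what is proved, stated in full; the proofs are below) =====
def Claim_equal_count_amazing_performances : Prop := ∀ (scores : List Int), Dom_count_amazing_performances scores → Spec_count_amazing_performances scores (count_amazing_performances scores)

-- ===== LEMMAS AND PROOFS =====

-- The count component of B's record fold is additive in its accumulator (new-maximum instance).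
lemma pv_shift_gt (xs : List Int) : ∀ (c b : Int),
    (xs.foldl (fun (st : Int × Int) s =>
      if decide (s > st.2) = true then (st.1 + 1, s) else st) (c, b)).1
    = c + (xs.foldl (fun (st : Int × Int) s =>
      if decide (s > st.2) = true then (st.1 + 1, s) else st) (0, b)).1 := by
  induction xs with
  | nil => intro c b; simp
  | cons s rest ih =>
    intro c b
    by_cases h : s > b
    · simp only [List.foldl, if_pos (decide_eq_true h)]
      rw [ih (c + 1) s, ih (0 + 1) s]; ring
    · simp only [List.foldl, if_neg (show ¬ decide (s > b) = true by simpa using h)]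
      exact ih c b

-- The count component of B's record fold is additive in its accumulator (new-minimum instance).
lemma pv_shift_lt (xs : List Int) : ∀ (c b : Int),
    (xs.foldl (fun (st : Int × Int) s =>
      if decide (s < st.2) = true then (st.1 + 1, s) else st) (c, b)).1
    = c + (xs.foldl (fun (st : Int × Int) s =>
      if decide (s < st.2) = true then (st.1 + 1, s) else st) (0, b)).1 := by
  induction xs with
  | nil => intro c b; simp
  | cons s rest ih =>
    intro c b
    by_cases h : s < b
    · simp only [List.foldl, if_pos (decide_eq_true h)]
      rw [ih (c + 1) s, ih (0 + 1) s]; ring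
    · simp only [List.foldl, if_neg (show ¬ decide (s < b) = true by simpa using h)]
      exact ih c b

-- A's combined fold counts exactly the new maxima plus the new minima.
lemma pv_main (rest : List Int) : ∀ (c mn mx : Int), mn ≤ mx →
    (rest.foldl (fun (st : Int × Int × Int) s =>
        if s > st.2.2 then (st.1 + 1, st.2.1, s)
        else if s < st.2.1 then (st.1 + 1, s, st.2.2)
        else st) (c, mn, mx)).1
    = c + (rest.foldl (fun (st : Int × Int) s =>
        if decide (s > st.2) = true then (st.1 + 1, s) else st) (0, mx)).1
        + (rest.foldl (fun (st : Int × Int) s =>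
        if decide (s < st.2) = true then (st.1 + 1, s) else st) (0, mn)).1 := by
  induction rest with
  | nil => intro c mn mx _; simp
  | cons s rest ih =>
    intro c mn mx hle
    by_cases h1 : s > mx
    · have h2 : ¬ s < mn := by omega
      simp only [List.foldl, if_pos h1, if_pos (decide_eq_true h1), if_neg h2,
        if_neg (show ¬ decide (s < mn) = true by simpa using h2)]
      rw [ih (c + 1) mn s (by omega), pv_shift_gt rest (0 + 1) s]
      ring
    · by_cases h2 : s < mn
      · simp only [List.foldl, if_neg h1, if_pos h2, if_pos (decide_eq_true h2),
          if_neg (show ¬ decide (s > mx) = true by simpa using h1)]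
        rw [ih (c + 1) s mx (by omega), pv_shift_lt rest (0 + 1) s]
        ring
      · simp only [List.foldl, if_neg h1, if_neg h2,
          if_neg (show ¬ decide (s > mx) = true by simpa using h1),
          if_neg (show ¬ decide (s < mn) = true by simpa using h2)]
        exact ih c mn mx hle

-- ===== VERDICT (by name: the statement is the Claim_ definition above) =====
theorem count_amazing_performances_spec : Claim_equal_count_amazing_performances := by
  intro scores _
  unfold Spec_count_amazing_performances count_amazing_performances count_amazing_performances_alt pvCountRecords
  match scores with
  | [] => simp
  | [x] => simp
  | x :: y :: rest =>
    simp only [List.length_cons, if_neg (by omega : ¬ (rest.length + 1 + 1 < 2))]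
    have h := pv_main (y :: rest) 0 x x le_rfl
    rw [zero_add] at h
    exact h
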